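-- pv_equiv track=rewrite | github.com/manaspatil1406/Financial-News-Market-Analysis | src/financial_lexicon.py | _find_keyword_matches
-- ===== SOURCE A (Python) =====
-- NEGATION_WORDS = {"not", "no", "never", "neither", "nor", "hardly", "barely", "doesn't", "didn't", "won't", "isn't", "aren't", "wasn't", "weren't", "couldn't", "wouldn't", "shouldn't", "despite"}
--
-- def _find_keyword_matches(text_lower, keyword_dict):
--     """
--     Find all matching keywords in text with negation awareness.
--     Returns list of (keyword, weight, negated) tuples.
--     Longest-match-first to handle multi-word phrases correctly.
--     """
--     matches = []
--     words = text_lower.split()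
--
--     # Sort keywords by length (longest first) to prioritize multi-word phrases
--     sorted_keywords = sorted(keyword_dict.keys(), key=len, reverse=True)
--
--     # Track which character positions have been matched (to avoid double-counting)
--     matched_positions = set()
--
--     for keyword in sorted_keywords:
--         # Find all occurrences of this keyword in text
--         start = 0
--         while True:
--             idx = text_lower.find(keyword, start)
--             if idx == -1:
--                 break
--
--             # Check if this position is already matched by a longer keyword
--             positions = set(range(idx, idx + len(keyword)))
--             if positions & matched_positions:
--                 start = idx + 1
--                 continue
--
--             # Check for negation: look at the 3 words preceding the keyword
--             prefix = text_lower[:idx].strip()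
--             prefix_words = prefix.split()[-3:]  # last 3 words before keyword
--             negated = any(neg in prefix_words for neg in NEGATION_WORDS)
--
--             weight = keyword_dict[keyword]
--             if negated:
--                 weight = -weight  # flip the weight
--
--             matches.append((keyword, weight, negated))
--             matched_positions.update(positions)
--
--             start = idx + len(keyword)
--
--     return matches
-- ===== SOURCE B (Python) =====
-- NEGATION_WORDS = {"not", "no", "never", "neither", "nor", "hardly", "barely", "doesn't", "didn't", "won't", "isn't", "aren't", "wasn't", "weren't", "couldn't", "wouldn't", "shouldn't", "despite"}
--
-- def _find_keyword_matches(text_lower, keyword_dict):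
--     """Index-based re-implementation: one pass over the text buckets every keyword
--     occurrence into a hash index keyed by keyword (probing a keyword set once per
--     (position, length) pair), then overlaps are resolved greedily from the
--     precomputed occurrence lists, longest keyword first."""
--     n = len(text_lower)
--     kwset = set(keyword_dict)
--     lengths = sorted({len(kw) for kw in keyword_dict})
--     # single left-to-right pass: bucket every occurrence by keyword
--     occ = {}
--     for i in range(n):
--         for L in lengths:
--             if i + L <= n and text_lower[i:i + L] in kwset:
--                 occ.setdefault(text_lower[i:i + L], []).append(i)
--     # greedy overlap resolution, longest keyword first
--     out, taken = [], []
--     for kw in sorted(keyword_dict, key=len, reverse=True):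
--         for i in occ.get(kw, []):
--             end = i + len(kw)
--             if all(b <= i or end <= a for a, b in taken):
--                 words = text_lower[:i].split()[-3:]
--                 neg = any(w in NEGATION_WORDS for w in words)
--                 w = keyword_dict[kw]
--                 out.append((kw, -w if neg else w, neg))
--                 taken.append((i, end))
--     return out
-- ===== Notes on version B (the rewrite author's own statement) =====
-- stated objective: alternative
-- what changed: B replaces A's per-keyword find()-rescanning with per-character matched-position sets by a single position-major pass over the text that buckets every keyword occurrence into a hash index keyed by keyword (one keyword-set probe per (position, distinct length) pair), followed by a separate greedy overlap-resolution pass over the precomputed occurrence lists using an interval list; Pre_ excludes dictionaries containing the empty-string keyword, on which A loops forever (find('') keeps returning the same index).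
import Mathlib
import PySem

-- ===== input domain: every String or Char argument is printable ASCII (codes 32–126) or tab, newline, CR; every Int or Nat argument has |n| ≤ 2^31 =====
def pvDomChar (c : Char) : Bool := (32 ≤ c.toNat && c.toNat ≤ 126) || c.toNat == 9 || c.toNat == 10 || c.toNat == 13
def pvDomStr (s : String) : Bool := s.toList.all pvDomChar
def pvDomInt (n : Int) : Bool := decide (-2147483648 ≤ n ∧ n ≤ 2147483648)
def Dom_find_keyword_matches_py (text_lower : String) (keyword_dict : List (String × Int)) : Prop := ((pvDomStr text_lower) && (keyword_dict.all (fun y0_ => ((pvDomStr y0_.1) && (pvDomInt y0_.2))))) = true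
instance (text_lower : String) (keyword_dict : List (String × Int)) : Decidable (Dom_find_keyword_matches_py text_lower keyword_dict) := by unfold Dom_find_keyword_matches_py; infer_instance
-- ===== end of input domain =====

-- B replaces A's per-keyword find()-rescanning (with a per-character matched-position set) by one
-- position-major pass bucketing every keyword occurrence into a hash index keyed by keyword,
-- followed by a separate greedy overlap-resolution pass over the precomputed occurrence lists
-- (objective: alternative).

-- ===== PORT A =====

def pvNegationWords : List String :=
  ["not", "no", "never", "neither", "nor", "hardly", "barely", "doesn't", "didn't", "won't",
   "isn't", "aren't", "wasn't", "weren't", "couldn't", "wouldn't", "shouldn't", "despite"]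

-- A's negation test: prefix = text_lower[:idx].strip(); prefix_words = prefix.split()[-3:];
-- any(neg in prefix_words for neg in NEGATION_WORDS)  (bool 'any' over the set: order-independent)
def pvNegatedA (text : String) (idx : Int) : Bool :=
  pvNegationWords.any (fun neg =>
    (PySem.List.slice
      (PySem.Str.split₀ (PySem.Str.strip (PySem.Str.slice text none (some idx))))
      (some (-3)) none).contains neg)

-- A's 'while True: idx = text_lower.find(keyword, start) …' loop; the fuel argument only makes
-- the recursion total (each iteration moves 'start' strictly forward when the keyword is
-- nonempty, which Pre_ guarantees, so the fuel passed by find_keyword_matches_py never runs out).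
def pvFindLoopA (text : String) (d : PySem.Dict String Int) (kw : String) :
    Nat → Int → List (String × Int × Bool) × PySem.Set Int →
    List (String × Int × Bool) × PySem.Set Int
  | 0, _, st => st
  | fuel + 1, start, st =>
    let idx := PySem.Str.findFrom text kw start
    if idx = -1 then st
    else
      let positions : PySem.Set Int :=
        PySem.Set.ofList (PySem.List.pyRange idx (idx + PySem.Str.len kw) 1)
      if PySem.Set.inter positions st.2 ≠ [] then
        pvFindLoopA text d kw fuel (idx + 1) st
      else
        let negated := pvNegatedA text idx
        let w := PySem.Dict.getD d kw 0
        let weight := if negated then -w else w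
        pvFindLoopA text d kw fuel (idx + PySem.Str.len kw)
          (st.1 ++ [(kw, weight, negated)], PySem.Set.update st.2 positions)

def find_keyword_matches_py (text_lower : String) (keyword_dict : List (String × Int)) :
    List (String × Int × Bool) :=
  let d := PySem.Dict.ofList keyword_dict
  -- 'words = text_lower.split()' in A is computed but never used; it has no effect on the result
  let sortedKeywords := PySem.List.sorted (PySem.Dict.keys d) (fun k => PySem.Str.len k) true
  (sortedKeywords.foldl
      (fun st kw => pvFindLoopA text_lower d kw (text_lower.toList.length + 2) 0 st)
      ([], PySem.Set.empty)).1

-- ===== PORT B =====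

-- B's negation test: text_lower[:i].split()[-3:], then membership the other way round
def pvNegatedB (text : String) (i : Int) : Bool :=
  (PySem.List.slice (PySem.Str.split₀ (PySem.Str.slice text none (some i)))
      (some (-3)) none).any (fun w => pvNegationWords.contains w)

-- body of B's inner bucketing loop 'for L in lengths: if i+L <= n and text_lower[i:i+L] in kwset'
def pvBucketStep (text : String) (kwset : PySem.Set String) (n i : Int)
    (occ : PySem.Dict String (List Int)) (L : Int) : PySem.Dict String (List Int) :=
  if decide (i + L ≤ n) && PySem.Set.contains kwset (PySem.Str.slice text (some i) (some (i + L))) then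
    -- occ.setdefault(text_lower[i:i+L], []).append(i)
    occ.modify (PySem.Str.slice text (some i) (some (i + L))) [] (· ++ [i])
  else occ

-- body of B's greedy loop 'for i in occ.get(kw, []): …'
def pvGreedyStep (text : String) (d : PySem.Dict String Int) (kw : String)
    (st : List (String × Int × Bool) × List (Int × Int)) (i : Int) :
    List (String × Int × Bool) × List (Int × Int) :=
  let e := i + PySem.Str.len kw
  if st.2.all (fun ab => decide (ab.2 ≤ i) || decide (e ≤ ab.1)) then
    let neg := pvNegatedB text i
    let w := PySem.Dict.getD d kw 0
    (st.1 ++ [(kw, if neg then -w else w, neg)], st.2 ++ [(i, e)])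
  else st

def find_keyword_matches_py_alt (text_lower : String) (keyword_dict : List (String × Int)) :
    List (String × Int × Bool) :=
  let d := PySem.Dict.ofList keyword_dict
  let n := PySem.Str.len text_lower
  let kwset : PySem.Set String := PySem.Set.ofList (PySem.Dict.keys d)
  let lengths := PySem.List.sorted
      (PySem.Set.ofList ((PySem.Dict.keys d).map (fun k => PySem.Str.len k))) (fun x => x) false
  -- single left-to-right pass: bucket every occurrence by keyword
  let occ := (PySem.List.pyRange 0 n 1).foldl
      (fun occ i => lengths.foldl (pvBucketStep text_lower kwset n i) occ) PySem.Dict.empty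
  -- greedy overlap resolution, longest keyword first
  ((PySem.List.sorted (PySem.Dict.keys d) (fun k => PySem.Str.len k) true).foldl
      (fun st kw => (PySem.Dict.getD occ kw []).foldl (pvGreedyStep text_lower d kw) st)
      ([], [])).1

-- ===== PRECONDITION & SPEC =====

-- Pre_ excludes only dictionaries containing the empty-string keyword: on those A's
-- 'start = idx + len(keyword)' no longer advances and A loops forever (it never returns).
def Pre_find_keyword_matches_py (text_lower : String) (keyword_dict : List (String × Int)) : Prop :=
  ∀ kv ∈ keyword_dict, kv.1 ≠ ""

instance (text_lower : String) (keyword_dict : List (String × Int)) :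
    Decidable (Pre_find_keyword_matches_py text_lower keyword_dict) := by
  unfold Pre_find_keyword_matches_py; infer_instance

def pvWitness_find_keyword_matches_py : String × (List (String × Int)) :=
  ("no gain today despite loss", [("gain", 2), ("loss", 3), ("no gain", 5)])

def Spec_find_keyword_matches_py (text_lower : String) (keyword_dict : List (String × Int))
    (out : List (String × Int × Bool)) : Prop :=
  out = find_keyword_matches_py_alt text_lower keyword_dict

instance (text_lower : String) (keyword_dict : List (String × Int))
    (out : List (String × Int × Bool)) :
    Decidable (Spec_find_keyword_matches_py text_lower keyword_dict out) := by
  unfold Spec_find_keyword_matches_py; infer_instance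

-- ===== CLAIM (what is proved, stated in full; the proofs are below) =====
def Claim_equal_find_keyword_matches_py : Prop := ∀ (text_lower : String) (keyword_dict : List (String × Int)), Dom_find_keyword_matches_py text_lower keyword_dict → Pre_find_keyword_matches_py text_lower keyword_dict → Spec_find_keyword_matches_py text_lower keyword_dict (find_keyword_matches_py text_lower keyword_dict)

-- ===== LEMMAS AND PROOFS =====

-- the occurrence test B's bucket pass effectively applies at position i for keyword kw
def pvPB (text kw : String) (i : Int) : Bool :=
  decide (i + PySem.Str.len kw ≤ PySem.Str.len text) &&
    (PySem.Str.slice text (some i) (some (i + PySem.Str.len kw)) == kw)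

-- A's matched-position set S and B's accepted-interval list T describe the same covered positions
def pvInv (S : PySem.Set Int) (T : List (Int × Int)) : Prop :=
  (∀ x : Int, x ∈ S ↔ ∃ ab ∈ T, ab.1 ≤ x ∧ x < ab.2) ∧ ∀ ab ∈ T, ab.1 < ab.2

lemma pvFoldl_fixed {α β : Type} (f : β → α → β) :
    ∀ (l : List α) (st : β), (∀ i ∈ l, f st i = st) → l.foldl f st = st := by
  intro l
  induction l with
  | nil => intro st _; rfl
  | cons x xs ih =>
    intro st h
    have hx : f st x = st := h x (by simp)
    simp only [List.foldl_cons, hx]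
    exact ih st (fun i hi => h i (by simp [hi]))

lemma pvSlice_toList (text : String) (i L : Int) (h0 : 0 ≤ i) (hL : 0 ≤ L) :
    (PySem.Str.slice text (some i) (some (i + L))).toList =
      (text.toList.drop i.toNat).take L.toNat := by
  rw [PySem.Str.toList_slice, PySem.Chars.slice_eq_listSlice,
    PySem.List.slice_toNat text.toList h0 (by omega)]
  congr 1
  omega

lemma pvPB_iff (text kw : String) (i : Int) (h0 : 0 ≤ i) :
    pvPB text kw i = true ↔
      i + (kw.toList.length : Int) ≤ (text.toList.length : Int) ∧
        kw.toList <+: text.toList.drop i.toNat := by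
  have hlen : PySem.Str.len kw = (kw.toList.length : Int) := rfl
  have hlent : PySem.Str.len text = (text.toList.length : Int) := rfl
  unfold pvPB
  rw [Bool.and_eq_true, decide_eq_true_eq, hlen, hlent, beq_iff_eq]
  refine and_congr_right (fun hb => ?_)
  rw [← String.toList_inj, pvSlice_toList text i (kw.toList.length : Int) h0 (by positivity),
    Int.toNat_natCast, List.prefix_iff_eq_take]
  exact eq_comm

lemma pvBucketStep_getD (text kw : String) (kwset : PySem.Set String) (n i L : Int)
    (occ : PySem.Dict String (List Int))
    (h0 : 0 ≤ i) (hL : 0 ≤ L) (hn : n = (text.toList.length : Int)) (hkw : kw ∈ kwset) :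
    (pvBucketStep text kwset n i occ L).getD kw [] =
      if L = PySem.Str.len kw ∧ pvPB text kw i = true then occ.getD kw [] ++ [i]
      else occ.getD kw [] := by
  have hlen : PySem.Str.len kw = (kw.toList.length : Int) := rfl
  have hlent : PySem.Str.len text = (text.toList.length : Int) := rfl
  unfold pvBucketStep
  by_cases hc : (decide (i + L ≤ n) &&
      PySem.Set.contains kwset (PySem.Str.slice text (some i) (some (i + L)))) = true
  · rw [if_pos hc]
    rw [Bool.and_eq_true, decide_eq_true_eq] at hc
    obtain ⟨hle, _⟩ := hc
    by_cases hsk : PySem.Str.slice text (some i) (some (i + L)) = kw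
    · have hLlen : (PySem.Str.slice text (some i) (some (i + L))).toList.length = L.toNat := by
        rw [pvSlice_toList text i L h0 hL, List.length_take, List.length_drop]
        omega
      have hLeq : L = PySem.Str.len kw := by
        rw [hsk] at hLlen
        rw [hlen]
        omega
      have hPB : pvPB text kw i = true := by
        unfold pvPB
        rw [Bool.and_eq_true, decide_eq_true_eq, beq_iff_eq]
        rw [← hLeq]
        exact ⟨by omega, hsk⟩
      rw [hsk, PySem.Dict.getD_modify_self, if_pos ⟨hLeq, hPB⟩]
    · rw [PySem.Dict.getD_modify_of_ne occ [] (· ++ [i]) (Ne.symm hsk)]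
      rw [if_neg]
      rintro ⟨hLeq, hPB⟩
      unfold pvPB at hPB
      rw [Bool.and_eq_true, decide_eq_true_eq, beq_iff_eq] at hPB
      rw [hLeq] at hsk
      exact hsk hPB.2
  · rw [if_neg hc]
    rw [if_neg]
    rintro ⟨hLeq, hPB⟩
    unfold pvPB at hPB
    rw [Bool.and_eq_true, decide_eq_true_eq, beq_iff_eq] at hPB
    apply hc
    rw [Bool.and_eq_true, decide_eq_true_eq]
    constructor
    · omega
    · rw [hLeq, hPB.2]
      exact (PySem.Set.contains_iff kwset kw).mpr hkw

lemma pvBucket_getD (text kw : String) (kwset : PySem.Set String) (n i : Int)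
    (h0 : 0 ≤ i) (hn : n = (text.toList.length : Int)) (hkw : kw ∈ kwset) :
    ∀ (lengths : List Int) (occ : PySem.Dict String (List Int)), lengths.Nodup →
      (∀ L ∈ lengths, 0 ≤ L) →
      (lengths.foldl (pvBucketStep text kwset n i) occ).getD kw [] =
        occ.getD kw [] ++
          (if PySem.Str.len kw ∈ lengths ∧ pvPB text kw i = true then [i] else []) := by
  intro lengths
  induction lengths with
  | nil => intro occ _ _; simp
  | cons L rest ih =>
    intro occ hnd hpos
    rw [List.foldl_cons]
    have hstep := pvBucketStep_getD text kw kwset n i L occ h0 (hpos L (by simp)) hn hkw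
    rw [ih (pvBucketStep text kwset n i occ L) hnd.of_cons
      (fun x hx => hpos x (by simp [hx]))]
    by_cases hLeq : L = PySem.Str.len kw
    · by_cases hPB : pvPB text kw i = true
      · rw [if_pos ⟨hLeq, hPB⟩] at hstep
        have hnotin : PySem.Str.len kw ∉ rest := by
          rw [← hLeq]
          exact (List.nodup_cons.mp hnd).1
        rw [hstep, if_neg (fun h => hnotin h.1), if_pos ⟨by simp [hLeq], hPB⟩]
        simp
      · rw [if_neg (fun h => hPB h.2)] at hstep
        rw [hstep, if_neg (fun h => hPB h.2), if_neg (fun h => hPB h.2)]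
    · rw [if_neg (fun h => hLeq h.1)] at hstep
      rw [hstep]
      have hmem : (PySem.Str.len kw ∈ L :: rest) ↔ (PySem.Str.len kw ∈ rest) := by
        simp only [List.mem_cons]
        constructor
        · rintro (h | h)
          · exact absurd h.symm hLeq
          · exact h
        · exact Or.inr
      by_cases hin : PySem.Str.len kw ∈ rest ∧ pvPB text kw i = true
      · rw [if_pos hin, if_pos ⟨hmem.mpr hin.1, hin.2⟩]
      · rw [if_neg hin, if_neg (fun h => hin ⟨hmem.mp h.1, h.2⟩)]

lemma pvOcc_getD (text kw : String) (kwset : PySem.Set String) (n : Int)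
    (hn : n = (text.toList.length : Int)) (hkw : kw ∈ kwset)
    (lengths : List Int) (hnd : lengths.Nodup) (hpos : ∀ L ∈ lengths, 0 ≤ L)
    (hmemlen : PySem.Str.len kw ∈ lengths) :
    ∀ (is : List Int) (occ : PySem.Dict String (List Int)), (∀ i ∈ is, 0 ≤ i) →
      ((is.foldl (fun occ i => lengths.foldl (pvBucketStep text kwset n i) occ) occ).getD kw []) =
        occ.getD kw [] ++ is.filter (fun i => pvPB text kw i) := by
  intro is
  induction is with
  | nil => intro occ _; simp
  | cons i rest ih =>
    intro occ hge
    rw [List.foldl_cons, ih _ (fun x hx => hge x (by simp [hx]))]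
    rw [pvBucket_getD text kw kwset n i (hge i (by simp)) hn hkw lengths occ hnd hpos]
    by_cases hPB : pvPB text kw i = true
    · rw [if_pos ⟨hmemlen, hPB⟩, List.filter_cons_of_pos hPB, List.append_assoc]
      rfl
    · rw [if_neg (fun h => hPB h.2), List.filter_cons_of_neg (by simpa using hPB)]
      simp

lemma pvDisjoint_iff (S : PySem.Set Int) (T : List (Int × Int)) (hInv : pvInv S T)
    (idx L : Int) (hL : 0 < L) :
    (T.all (fun ab => decide (ab.2 ≤ idx) || decide (idx + L ≤ ab.1))) = true ↔
      PySem.Set.inter (PySem.Set.ofList (PySem.List.pyRange idx (idx + L) 1)) S = [] := by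
  obtain ⟨hmem, hpos⟩ := hInv
  constructor
  · intro hall
    by_contra hne
    obtain ⟨y, hy⟩ := List.exists_mem_of_ne_nil _ hne
    rw [PySem.Set.mem_inter] at hy
    obtain ⟨hy1, hy2⟩ := hy
    rw [PySem.Set.mem_ofList, PySem.List.mem_pyRange_one] at hy1
    obtain ⟨ab, habT, hab⟩ := (hmem y).mp hy2
    have := List.all_eq_true.mp hall ab habT
    simp only [Bool.or_eq_true, decide_eq_true_eq] at this
    omega
  · intro hnil
    rw [List.all_eq_true]
    intro ab habT
    simp only [Bool.or_eq_true, decide_eq_true_eq]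
    by_contra hcon
    rw [not_or] at hcon
    have hlt := hpos ab habT
    have hmm : max idx ab.1 ∈ PySem.Set.inter
        (PySem.Set.ofList (PySem.List.pyRange idx (idx + L) 1)) S := by
      rw [PySem.Set.mem_inter]
      refine ⟨?_, (hmem _).mpr ⟨ab, habT, by omega⟩⟩
      rw [PySem.Set.mem_ofList, PySem.List.mem_pyRange_one]
      omega
    rw [hnil] at hmm
    exact absurd hmm (List.not_mem_nil)

lemma pvInv_update (S : PySem.Set Int) (T : List (Int × Int)) (hInv : pvInv S T)
    (idx L : Int) (hL : 0 < L) :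
    pvInv (PySem.Set.update S (PySem.Set.ofList (PySem.List.pyRange idx (idx + L) 1)))
      (T ++ [(idx, idx + L)]) := by
  obtain ⟨hmem, hpos⟩ := hInv
  constructor
  · intro x
    rw [PySem.Set.mem_update, hmem x, PySem.Set.mem_ofList, PySem.List.mem_pyRange_one]
    constructor
    · rintro (⟨ab, habT, hab⟩ | hx)
      · exact ⟨ab, by simp [habT], hab⟩
      · exact ⟨(idx, idx + L), by simp, by simpa using hx⟩
    · rintro ⟨ab, habT, hab⟩
      rcases List.mem_append.mp habT with h | h
      · exact Or.inl ⟨ab, h, hab⟩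
      · simp only [List.mem_singleton] at h
        subst h
        right
        simpa using hab
  · intro ab hab
    rcases List.mem_append.mp hab with h | h
    · exact hpos ab h
    · simp only [List.mem_singleton] at h
      subst h
      simpa using hL

-- split() ignores leading/trailing whitespace, so A's '.strip()' before '.split()' is a no-op
lemma pvGo_space_tail : ∀ (t cur : List Char) (acc : List (List Char)),
    (∀ c ∈ t, PySem.Chars.isspace c = true) →
    PySem.Chars.split₀.go t cur acc = PySem.Chars.split₀.go [] cur acc := by
  intro t
  induction t with
  | nil => intro cur acc _; rfl
  | cons c rest ih =>
    intro cur acc h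
    have hc : PySem.Chars.isspace c = true := h c (by simp)
    have ht : ∀ x ∈ rest, PySem.Chars.isspace x = true := fun x hx => h x (by simp [hx])
    by_cases hcur : cur.isEmpty = true
    · have hc0 : cur = [] := List.isEmpty_iff.mp hcur
      subst hc0
      rw [show PySem.Chars.split₀.go (c :: rest) [] acc = PySem.Chars.split₀.go rest [] acc by
        simp [PySem.Chars.split₀.go, hc]]
      exact ih [] acc ht
    · rw [show PySem.Chars.split₀.go (c :: rest) cur acc =
          PySem.Chars.split₀.go rest [] (cur.reverse :: acc) by
        simp [PySem.Chars.split₀.go, hc, hcur]]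
      rw [ih [] (cur.reverse :: acc) ht]
      simp [PySem.Chars.split₀.go, hcur]

lemma pvGo_append_space (s t : List Char) (h : ∀ c ∈ t, PySem.Chars.isspace c = true) :
    ∀ cur acc, PySem.Chars.split₀.go (s ++ t) cur acc = PySem.Chars.split₀.go s cur acc := by
  induction s with
  | nil =>
    intro cur acc
    rw [List.nil_append]
    exact pvGo_space_tail t cur acc h
  | cons c rest ih =>
    intro cur acc
    rw [List.cons_append]
    cases hc : PySem.Chars.isspace c with
    | true =>
      cases hcur : cur.isEmpty with
      | true =>
        rw [show PySem.Chars.split₀.go (c :: (rest ++ t)) cur acc =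
              PySem.Chars.split₀.go (rest ++ t) [] acc by simp [PySem.Chars.split₀.go, hc, hcur],
            show PySem.Chars.split₀.go (c :: rest) cur acc =
              PySem.Chars.split₀.go rest [] acc by simp [PySem.Chars.split₀.go, hc, hcur]]
        exact ih [] acc
      | false =>
        rw [show PySem.Chars.split₀.go (c :: (rest ++ t)) cur acc =
              PySem.Chars.split₀.go (rest ++ t) [] (cur.reverse :: acc) by
            simp [PySem.Chars.split₀.go, hc, hcur],
            show PySem.Chars.split₀.go (c :: rest) cur acc =
              PySem.Chars.split₀.go rest [] (cur.reverse :: acc) by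
            simp [PySem.Chars.split₀.go, hc, hcur]]
        exact ih [] (cur.reverse :: acc)
    | false =>
      rw [show PySem.Chars.split₀.go (c :: (rest ++ t)) cur acc =
            PySem.Chars.split₀.go (rest ++ t) (c :: cur) acc by simp [PySem.Chars.split₀.go, hc],
          show PySem.Chars.split₀.go (c :: rest) cur acc =
            PySem.Chars.split₀.go rest (c :: cur) acc by simp [PySem.Chars.split₀.go, hc]]
      exact ih (c :: cur) acc

lemma pvGo_lstrip (s : List Char) :
    ∀ acc, PySem.Chars.split₀.go (List.dropWhile PySem.Chars.isspace s) [] acc =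
      PySem.Chars.split₀.go s [] acc := by
  induction s with
  | nil => intro acc; rfl
  | cons c rest ih =>
    intro acc
    cases hc : PySem.Chars.isspace c with
    | true =>
      rw [List.dropWhile_cons_of_pos hc]
      rw [show PySem.Chars.split₀.go (c :: rest) [] acc =
            PySem.Chars.split₀.go rest [] acc by simp [PySem.Chars.split₀.go, hc]]
      exact ih acc
    | false =>
      rw [List.dropWhile_cons_of_neg (by simp [hc])]

lemma pvSplit₀_strip (s : List Char) :
    PySem.Chars.split₀ (PySem.Chars.strip s) = PySem.Chars.split₀ s := by
  unfold PySem.Chars.split₀ PySem.Chars.strip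
  have htr : ∀ c ∈ (List.takeWhile PySem.Chars.isspace (PySem.Chars.lstrip s).reverse).reverse,
      PySem.Chars.isspace c = true := by
    intro c hc
    rw [List.mem_reverse] at hc
    exact List.mem_takeWhile_imp hc
  have hdecomp : PySem.Chars.lstrip s =
      PySem.Chars.rstrip (PySem.Chars.lstrip s) ++
        (List.takeWhile PySem.Chars.isspace (PySem.Chars.lstrip s).reverse).reverse := by
    unfold PySem.Chars.rstrip
    conv_lhs => rw [← List.reverse_reverse (PySem.Chars.lstrip s),
      ← List.takeWhile_append_dropWhile (p := PySem.Chars.isspace)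
        (l := (PySem.Chars.lstrip s).reverse)]
    rw [List.reverse_append]
  calc PySem.Chars.split₀.go (PySem.Chars.rstrip (PySem.Chars.lstrip s)) [] []
      = PySem.Chars.split₀.go (PySem.Chars.rstrip (PySem.Chars.lstrip s) ++
          (List.takeWhile PySem.Chars.isspace (PySem.Chars.lstrip s).reverse).reverse) [] [] :=
        (pvGo_append_space _ _ htr [] []).symm
    _ = PySem.Chars.split₀.go (PySem.Chars.lstrip s) [] [] := by rw [← hdecomp]
    _ = PySem.Chars.split₀.go s [] [] := by
        rw [show PySem.Chars.lstrip s = List.dropWhile PySem.Chars.isspace s from rfl]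
        exact pvGo_lstrip s []

lemma pvAnyComm (l m : List String) :
    (l.any fun a => m.contains a) = (m.any fun b => l.contains b) := by
  have h : ∀ (x y : List String), (x.any fun a => y.contains a) = true ↔ ∃ a, a ∈ x ∧ a ∈ y := by
    intro x y
    simp [List.any_eq_true]
  rcases hl : (l.any fun a => m.contains a) <;>
    rcases hm : (m.any fun b => l.contains b) <;> try rfl
  · obtain ⟨a, h1, h2⟩ := (h m l).mp hm
    have hcon := (h l m).mpr ⟨a, h2, h1⟩
    rw [hl] at hcon
    exact absurd hcon Bool.false_ne_true
  · obtain ⟨a, h1, h2⟩ := (h l m).mp hl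
    have hcon := (h m l).mpr ⟨a, h2, h1⟩
    rw [hm] at hcon
    exact absurd hcon Bool.false_ne_true

lemma pvNegated_eq (text : String) (i : Int) : pvNegatedA text i = pvNegatedB text i := by
  unfold pvNegatedA pvNegatedB
  have hsp : PySem.Str.split₀ (PySem.Str.strip (PySem.Str.slice text none (some i))) =
      PySem.Str.split₀ (PySem.Str.slice text none (some i)) := by
    unfold PySem.Str.split₀
    rw [PySem.Str.toList_strip, pvSplit₀_strip]
  rw [hsp]
  exact pvAnyComm _ _

lemma pvInner_eq (text : String) (d : PySem.Dict String Int) (kw : String)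
    (hkw : kw.toList ≠ []) :
    ∀ (fuel : Nat) (start : Int), 0 ≤ start → start ≤ (text.toList.length : Int) →
    (text.toList.length : Int) + 1 - start ≤ (fuel : Int) →
    ∀ (stA : List (String × Int × Bool) × PySem.Set Int)
      (stB : List (String × Int × Bool) × List (Int × Int)),
      stA.1 = stB.1 → pvInv stA.2 stB.2 →
      (pvFindLoopA text d kw fuel start stA).1 =
        (((PySem.List.pyRange start (text.toList.length : Int) 1).filter
            (fun i => pvPB text kw i)).foldl (pvGreedyStep text d kw) stB).1 ∧
      pvInv (pvFindLoopA text d kw fuel start stA).2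
        (((PySem.List.pyRange start (text.toList.length : Int) 1).filter
            (fun i => pvPB text kw i)).foldl (pvGreedyStep text d kw) stB).2 := by
  intro fuel
  induction fuel with
  | zero =>
    intro start h0 hn hfuel stA stB h1 h2
    exfalso
    simp only [Nat.cast_zero] at hfuel
    omega
  | succ fuel ih =>
    intro start h0 hn hfuel stA stB h1 h2
    obtain ⟨k, rfl⟩ : ∃ kk : Nat, start = ((kk : Nat) : Int) := ⟨start.toNat, by omega⟩
    have hk : k ≤ text.toList.length := by exact_mod_cast hn
    have hLc : PySem.Str.len kw = (kw.toList.length : Int) := rfl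
    have hL1 : 1 ≤ (kw.toList.length : Int) := by
      have hpos : 0 < kw.toList.length := List.length_pos_iff.mpr hkw
      omega
    have hLpos : 0 < PySem.Str.len kw := by rw [hLc]; omega
    simp only [pvFindLoopA]
    by_cases hneg : PySem.Str.findFrom text kw (k : Int) = -1
    · rw [if_pos hneg]
      have hnone : ¬ kw.toList <:+: text.toList.drop k :=
        (PySem.Chars.findFrom_natCast_eq_neg_one_iff text.toList kw.toList k hk).mp hneg
      have hfil : (PySem.List.pyRange (k : Int) (text.toList.length : Int) 1).filter
          (fun i => pvPB text kw i) = [] := by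
        rw [List.filter_eq_nil_iff]
        intro i hi hPB
        rw [PySem.List.mem_pyRange_one] at hi
        obtain ⟨hb, hp⟩ := (pvPB_iff text kw i (by omega)).mp hPB
        apply hnone
        refine (PySem.Chars.isIn_iff_infix _ _).mp
          ((PySem.Chars.exists_prefix_drop_iff_isIn _ _).mp ⟨i.toNat - k, ?_⟩)
        rw [List.drop_drop, show k + (i.toNat - k) = i.toNat by omega]
        exact hp
      rw [hfil]
      exact ⟨h1, h2⟩
    · have hspec := PySem.Chars.findFrom_natCast_spec text.toList kw.toList k hk hneg
      have hconv : PySem.Chars.findFrom text.toList kw.toList ((k : Nat) : Int) none =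
          PySem.Str.findFrom text kw ((k : Nat) : Int) := rfl
      rw [hconv] at hspec
      obtain ⟨hge, hpref, hmin⟩ := hspec
      rw [if_neg hneg]
      set idx := PySem.Str.findFrom text kw ((k : Nat) : Int) with hidxdef
      have h0idx : 0 ≤ idx := by
        have hk0 : (0 : Int) ≤ (k : Int) := Int.natCast_nonneg k
        omega
      have hplen : kw.toList.length ≤ text.toList.length - idx.toNat := by
        have := hpref.length_le
        rwa [List.length_drop] at this
      have hidxle : idx + PySem.Str.len kw ≤ (text.toList.length : Int) := by
        rw [hLc]; omega
      have hidxlt : idx < (text.toList.length : Int) := by rw [hLc] at hidxle; omega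
      have hPBidx : pvPB text kw idx = true := by
        rw [pvPB_iff text kw idx h0idx]
        exact ⟨by rw [hLc] at hidxle; omega, hpref⟩
      -- candidate positions strictly before idx are not occurrences
      rw [PySem.List.pyRange_one_append (k : Int) idx (text.toList.length : Int) hge
        (by omega), List.filter_append]
      have hfil1 : (PySem.List.pyRange (k : Int) idx 1).filter (fun i => pvPB text kw i) = [] := by
        rw [List.filter_eq_nil_iff]
        intro i hi hPB
        rw [PySem.List.mem_pyRange_one] at hi
        obtain ⟨hb, hp⟩ := (pvPB_iff text kw i (by omega)).mp hPB
        exact hmin i.toNat (by omega) (by omega) hp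
      rw [hfil1, List.nil_append,
        PySem.List.pyRange_one_cons (a := idx) (b := (text.toList.length : Int)) hidxlt,
        List.filter_cons_of_pos hPBidx, List.foldl_cons]
      by_cases hovl : PySem.Set.inter
          (PySem.Set.ofList (PySem.List.pyRange idx (idx + PySem.Str.len kw) 1)) stA.2 ≠ []
      · -- position already covered: A retries from idx+1, B skips the candidate idx
        rw [if_pos hovl]
        have hallf : ¬ ((stB.2.all
            (fun ab => decide (ab.2 ≤ idx) || decide (idx + PySem.Str.len kw ≤ ab.1))) = true) :=
          fun hall => hovl ((pvDisjoint_iff stA.2 stB.2 h2 idx (PySem.Str.len kw) hLpos).mp hall)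
        have hstep : pvGreedyStep text d kw stB idx = stB := by
          simp only [pvGreedyStep]
          rw [if_neg hallf]
        rw [hstep]
        exact ih (idx + 1) (by omega) (by omega) (by push_cast at hfuel ⊢; omega) stA stB h1 h2
      · rw [if_neg hovl]
        rw [not_not] at hovl
        have hall : (stB.2.all
            (fun ab => decide (ab.2 ≤ idx) || decide (idx + PySem.Str.len kw ≤ ab.1))) = true :=
          (pvDisjoint_iff stA.2 stB.2 h2 idx (PySem.Str.len kw) hLpos).mpr hovl
        have hstep : pvGreedyStep text d kw stB idx =
            (stB.1 ++ [(kw, if pvNegatedB text idx then -(PySem.Dict.getD d kw 0)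
                else PySem.Dict.getD d kw 0, pvNegatedB text idx)],
             stB.2 ++ [(idx, idx + PySem.Str.len kw)]) := by
          simp only [pvGreedyStep]
          rw [if_pos hall]
        rw [hstep]
        set stB' : List (String × Int × Bool) × List (Int × Int) :=
          (stB.1 ++ [(kw, if pvNegatedB text idx then -(PySem.Dict.getD d kw 0)
              else PySem.Dict.getD d kw 0, pvNegatedB text idx)],
           stB.2 ++ [(idx, idx + PySem.Str.len kw)]) with hstB'
        have hmem' : ((idx, idx + PySem.Str.len kw) : Int × Int) ∈ stB'.2 := by
          rw [hstB']; simp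
        -- candidates inside the freshly accepted interval are rejected by the overlap check
        have hfix : ((PySem.List.pyRange (idx + 1) (idx + PySem.Str.len kw) 1).filter
            (fun i => pvPB text kw i)).foldl (pvGreedyStep text d kw) stB' = stB' := by
          apply pvFoldl_fixed
          intro i hi
          rw [List.mem_filter, PySem.List.mem_pyRange_one] at hi
          simp only [pvGreedyStep]
          rw [if_neg]
          intro hall'
          have := List.all_eq_true.mp hall' _ hmem'
          simp only [Bool.or_eq_true, decide_eq_true_eq] at this
          omega
        have hbridge : ((PySem.List.pyRange (idx + 1) (text.toList.length : Int) 1).filter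
              (fun i => pvPB text kw i)).foldl (pvGreedyStep text d kw) stB' =
            ((PySem.List.pyRange (idx + PySem.Str.len kw) (text.toList.length : Int) 1).filter
              (fun i => pvPB text kw i)).foldl (pvGreedyStep text d kw) stB' := by
          rw [PySem.List.pyRange_one_append (idx + 1) (idx + PySem.Str.len kw)
            (text.toList.length : Int) (by omega) hidxle, List.filter_append,
            List.foldl_append, hfix]
        rw [hbridge]
        have h1' : stA.1 ++ [(kw, if pvNegatedA text idx then -(PySem.Dict.getD d kw 0)
            else PySem.Dict.getD d kw 0, pvNegatedA text idx)] = stB'.1 := by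
          rw [hstB', h1, pvNegated_eq]
        have hinv' : pvInv (PySem.Set.update stA.2
            (PySem.Set.ofList (PySem.List.pyRange idx (idx + PySem.Str.len kw) 1))) stB'.2 := by
          rw [hstB']
          exact pvInv_update stA.2 stB.2 h2 idx (PySem.Str.len kw) hLpos
        exact ih (idx + PySem.Str.len kw) (by omega) hidxle
          (by rw [hLc]; push_cast at hfuel ⊢; omega) _ stB' h1' hinv'

lemma pvOuter_eq (text : String) (d : PySem.Dict String Int)
    (occ : PySem.Dict String (List Int)) :
    ∀ (ks : List String), (∀ k ∈ ks, k.toList ≠ []) →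
    (∀ k ∈ ks, occ.getD k [] = (PySem.List.pyRange 0 (text.toList.length : Int) 1).filter
        (fun i => pvPB text k i)) →
    ∀ (stA : List (String × Int × Bool) × PySem.Set Int)
      (stB : List (String × Int × Bool) × List (Int × Int)),
      stA.1 = stB.1 → pvInv stA.2 stB.2 →
      (ks.foldl (fun st kw => pvFindLoopA text d kw (text.toList.length + 2) 0 st) stA).1 =
        (ks.foldl (fun st kw => (PySem.Dict.getD occ kw []).foldl
            (pvGreedyStep text d kw) st) stB).1 ∧
      pvInv (ks.foldl (fun st kw => pvFindLoopA text d kw (text.toList.length + 2) 0 st) stA).2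
        (ks.foldl (fun st kw => (PySem.Dict.getD occ kw []).foldl
            (pvGreedyStep text d kw) st) stB).2 := by
  intro ks
  induction ks with
  | nil =>
    intro _ _ stA stB h1 h2
    exact ⟨h1, h2⟩
  | cons kw rest ih =>
    intro hks hocc stA stB h1 h2
    simp only [List.foldl_cons]
    have hkw : kw.toList ≠ [] := hks kw (by simp)
    have hstep := pvInner_eq text d kw hkw (text.toList.length + 2) 0 (by omega)
      (by positivity) (by push_cast; omega) stA stB h1 h2
    rw [hocc kw (by simp)]
    exact ih (fun x hx => hks x (by simp [hx])) (fun x hx => hocc x (by simp [hx]))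
      _ _ hstep.1 hstep.2

-- ===== VERDICT (by name: the statement is the Claim_ definition above) =====
theorem find_keyword_matches_py_spec : Claim_equal_find_keyword_matches_py := by
  intro text kd hdom hpre
  unfold Spec_find_keyword_matches_py
  unfold find_keyword_matches_py find_keyword_matches_py_alt
  set d := PySem.Dict.ofList kd with hd
  set kwset : PySem.Set String := PySem.Set.ofList (PySem.Dict.keys d) with hkwset
  set lengths := PySem.List.sorted
      (PySem.Set.ofList ((PySem.Dict.keys d).map (fun k => PySem.Str.len k))) (fun x => x) false
    with hlengths
  set ks := PySem.List.sorted (PySem.Dict.keys d) (fun k => PySem.Str.len k) true with hks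
  set occ := (PySem.List.pyRange 0 (PySem.Str.len text) 1).foldl
      (fun occ i => lengths.foldl (pvBucketStep text kwset (PySem.Str.len text) i) occ)
      PySem.Dict.empty with hocc
  have hn : PySem.Str.len text = (text.toList.length : Int) := rfl
  have hndlen : lengths.Nodup := by
    rw [hlengths]
    exact (PySem.List.sorted_perm _ _ _).nodup_iff.mpr (PySem.Set.nodup_ofList _)
  have hposlen : ∀ L ∈ lengths, 0 ≤ L := by
    intro L hL
    rw [hlengths, PySem.List.mem_sorted, PySem.Set.mem_ofList, List.mem_map] at hL
    obtain ⟨kx, _, rfl⟩ := hL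
    have : PySem.Str.len kx = (kx.toList.length : Int) := rfl
    rw [this]
    positivity
  have hoccD : ∀ k ∈ ks, occ.getD k [] =
      (PySem.List.pyRange 0 (text.toList.length : Int) 1).filter (fun i => pvPB text k i) := by
    intro k hkmem
    have hkeys : k ∈ PySem.Dict.keys d := by
      rw [hks, PySem.List.mem_sorted] at hkmem
      exact hkmem
    have hkset : k ∈ kwset := by
      rw [hkwset, PySem.Set.mem_ofList]
      exact hkeys
    have hmemlen : PySem.Str.len k ∈ lengths := by
      rw [hlengths, PySem.List.mem_sorted, PySem.Set.mem_ofList, List.mem_map]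
      exact ⟨k, hkeys, rfl⟩
    rw [hocc, pvOcc_getD text k kwset (PySem.Str.len text) hn hkset lengths hndlen hposlen
      hmemlen _ PySem.Dict.empty (fun i hi => ((PySem.List.mem_pyRange_one).mp hi).1)]
    rw [PySem.Dict.getD_empty, List.nil_append, hn]
  have hksne : ∀ k ∈ ks, k.toList ≠ [] := by
    intro k hkmem
    rw [hks, PySem.List.mem_sorted] at hkmem
    have hkeys : (PySem.Dict.ofList kd : PySem.Dict String Int).keys =
        PySem.Set.ofList (kd.map Prod.fst) := by
      rw [show (PySem.Dict.ofList kd : PySem.Dict String Int) =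
        List.foldl (fun acc p => acc.insert p.1 p.2) PySem.Dict.empty kd from rfl]
      rw [PySem.Dict.keys_foldl_insert_key kd Prod.fst (fun _ p => p.2) PySem.Dict.empty]
      rw [show (PySem.Dict.empty : PySem.Dict String Int).keys = [] from rfl,
        PySem.Set.update_nil_left]
    rw [hd, hkeys, PySem.Set.mem_ofList, List.mem_map] at hkmem
    obtain ⟨p, hp, rfl⟩ := hkmem
    have hne := hpre p hp
    intro hnil
    apply hne
    rw [← String.toList_inj]
    simpa using hnil
  have hinv0 : pvInv PySem.Set.empty [] := by
    constructor
    · intro x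
      simp [PySem.Set.empty]
    · simp
  exact (pvOuter_eq text d occ ks hksne hoccD ([], PySem.Set.empty) ([], []) rfl hinv0).1
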